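-- pv_equiv track=rewrite | github.com/Taijii-Boy/Learning | Свейгарт Э - Большая книга проектов/1. Бейглз - моя версия.py | get_clue
-- ===== SOURCE A (Python) =====
-- def get_clue(digit: str, secr_number: str) -> str:
--     clues = []
--     for i in range(len(digit)):
--         if digit[i] == secr_number[i]:
--             clues.append("Fermi")
--         elif digit[i] in secr_number:
--             clues.append("Pico")
--     if len(clues) == 0:
--         return 'Bagels'
--     clues.sort()
--     return ' '.join(clues)
-- ===== SOURCE B (Python) =====
-- def get_clue(digit: str, secr_number: str) -> str:
--     fermi = pico = 0
--     for a, b in zip(digit, secr_number):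
--         if a == b:
--             fermi += 1
--         elif a in secr_number:
--             pico += 1
--     if fermi == 0 and pico == 0:
--         return 'Bagels'
--     return ' '.join(['Fermi'] * fermi + ['Pico'] * pico)
-- ===== Notes on version B (the rewrite author's own statement) =====
-- stated objective: simpler
-- what changed: Two integer counters over zip(digit, secr_number) replace the collect-then-sort list: since sorting always puts every 'Fermi' before every 'Pico', B emits ' '.join(['Fermi']*fermi + ['Pico']*pico) directly, with no list and no sort.
import Mathlib
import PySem

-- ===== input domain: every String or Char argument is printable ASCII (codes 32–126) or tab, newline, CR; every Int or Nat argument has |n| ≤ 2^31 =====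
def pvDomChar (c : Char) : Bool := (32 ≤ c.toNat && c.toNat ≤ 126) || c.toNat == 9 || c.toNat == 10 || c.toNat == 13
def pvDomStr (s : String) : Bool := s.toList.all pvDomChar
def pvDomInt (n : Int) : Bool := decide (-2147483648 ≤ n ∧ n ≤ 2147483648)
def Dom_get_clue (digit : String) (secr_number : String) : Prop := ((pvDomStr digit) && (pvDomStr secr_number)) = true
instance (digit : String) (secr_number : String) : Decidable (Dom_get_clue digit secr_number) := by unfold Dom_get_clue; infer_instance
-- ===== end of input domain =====

-- B replaces A's collect-then-sort clue list by two counters over zip and emits all "Fermi" before all "Pico" directly, with no clue list and no sort (objective: simpler).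
-- A raises IndexError when len(digit) > len(secr_number); Pre_ excludes exactly those inputs.


-- ===== PORT A =====
-- transliteration of A: index loop over range(len(digit)), clue list, sort, join
def get_clue (digit : String) (secr_number : String) : String :=
  let d := digit.toList
  let s := secr_number.toList
  let clues := (List.range d.length).foldl (fun (clues : List String) (i : Nat) =>
    match PySem.List.pyGet? d (i : Int), PySem.List.pyGet? s (i : Int) with
    | some a, some b =>
        if a = b then clues ++ ["Fermi"]
        else if PySem.Chars.isIn [a] s then clues ++ ["Pico"]
        else clues
    | _, _ => clues) ([] : List String)   -- the none case is an IndexError, excluded by Pre_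
  if clues.length = 0 then "Bagels"
  else PySem.Str.join " " (PySem.List.sorted clues (fun x => x) false)

-- ===== PORT B =====
-- transliteration of B: one pass over zip with (fermi, pico) counters, then emit in fixed order
def get_clue_alt (digit : String) (secr_number : String) : String :=
  let s := secr_number.toList
  let fp := (digit.toList.zip s).foldl (fun (fp : Nat × Nat) ab =>
      if ab.1 = ab.2 then (fp.1 + 1, fp.2)
      else if PySem.Chars.isIn [ab.1] s then (fp.1, fp.2 + 1)
      else fp) (0, 0)
  if fp.1 = 0 ∧ fp.2 = 0 then "Bagels"
  else PySem.Str.join " " (List.replicate fp.1 "Fermi" ++ List.replicate fp.2 "Pico")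

-- ===== PRECONDITION & SPEC =====
-- Pre_ excludes exactly the inputs where A raises IndexError (secr_number[i] with i ≥ len(secr_number))
def Pre_get_clue (digit : String) (secr_number : String) : Prop :=
  digit.toList.length ≤ secr_number.toList.length
instance (digit : String) (secr_number : String) : Decidable (Pre_get_clue digit secr_number) := by
  unfold Pre_get_clue; infer_instance
def pvWitness_get_clue : String × String := ("12", "21")

def Spec_get_clue (digit : String) (secr_number : String) (out : String) : Prop := out = get_clue_alt digit secr_number
instance (digit : String) (secr_number : String) (out : String) : Decidable (Spec_get_clue digit secr_number out) := by unfold Spec_get_clue; infer_instance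

-- ===== CLAIM (what is proved, stated in full; the proofs are below) =====
def Claim_equal_get_clue : Prop := ∀ (digit : String) (secr_number : String), Dom_get_clue digit secr_number → Pre_get_clue digit secr_number → Spec_get_clue digit secr_number (get_clue digit secr_number)

-- ===== LEMMAS AND PROOFS =====

-- per-position clue of A, as a (0- or 1-element) list over the zipped pair
def clueStep (s : List Char) (ab : Char × Char) : List String :=
  if ab.1 = ab.2 then ["Fermi"]
  else if PySem.Chars.isIn [ab.1] s then ["Pico"]
  else []

theorem a_fold_eq_flatMap (d s : List Char) (h : d.length ≤ s.length) :
    (List.range d.length).foldl (fun (clues : List String) (i : Nat) =>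
      match PySem.List.pyGet? d (i : Int), PySem.List.pyGet? s (i : Int) with
      | some a, some b =>
          if a = b then clues ++ ["Fermi"]
          else if PySem.Chars.isIn [a] s then clues ++ ["Pico"]
          else clues
      | _, _ => clues) [] = (d.zip s).flatMap (clueStep s) := by
  have key : ∀ n, n ≤ d.length → ∀ init : List String,
      (List.range n).foldl (fun (clues : List String) (i : Nat) =>
        match PySem.List.pyGet? d (i : Int), PySem.List.pyGet? s (i : Int) with
        | some a, some b =>
            if a = b then clues ++ ["Fermi"]
            else if PySem.Chars.isIn [a] s then clues ++ ["Pico"]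
            else clues
        | _, _ => clues) init = init ++ ((d.zip s).take n).flatMap (clueStep s) := by
    intro n
    induction n with
    | zero => intro _ init; simp
    | succ n ih =>
      intro hn init
      have hd : n < d.length := by omega
      have hs : n < s.length := by omega
      have hz : n < (d.zip s).length := by simp; omega
      rw [List.range_succ, List.foldl_append, ih (by omega) init]
      rw [List.take_succ_eq_append_getElem hz, List.flatMap_append]
      have hgd : PySem.List.pyGet? d ((n : Nat) : Int) = some d[n] := by
        simp [PySem.List.pyGet?_natCast, List.getElem?_eq_getElem hd]
      have hgs : PySem.List.pyGet? s ((n : Nat) : Int) = some s[n] := by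
        simp [PySem.List.pyGet?_natCast, List.getElem?_eq_getElem hs]
      simp only [List.foldl_cons, List.foldl_nil, hgd, hgs, List.getElem_zip, clueStep,
        List.flatMap_cons, List.flatMap_nil, List.append_nil]
      split_ifs <;> simp [List.append_assoc]
  have := key d.length (le_refl _) []
  simpa [List.take_of_length_le (by rw [List.length_zip]; omega : (d.zip s).length ≤ d.length)] using this

theorem b_fold_counts (s : List Char) (ps : List (Char × Char)) (f p : Nat) :
    ps.foldl (fun (fp : Nat × Nat) ab =>
      if ab.1 = ab.2 then (fp.1 + 1, fp.2)
      else if PySem.Chars.isIn [ab.1] s then (fp.1, fp.2 + 1)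
      else fp) (f, p)
    = (f + ((ps.flatMap (clueStep s)).count "Fermi"),
       p + ((ps.flatMap (clueStep s)).count "Pico")) := by
  induction ps generalizing f p with
  | nil => simp
  | cons ab t ih =>
    simp only [List.foldl_cons, List.flatMap_cons, clueStep]
    split_ifs with h1 h2 <;>
      simp only [ih, List.count_cons, List.nil_append,
        List.singleton_append] <;>
      simp <;> omega

theorem perm_counts {α : Type} [DecidableEq α] (a b : α) (hab : a ≠ b)
    (l : List α) (hl : ∀ x ∈ l, x = a ∨ x = b) :
    l.Perm (List.replicate (l.count a) a ++ List.replicate (l.count b) b) := by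
  induction l with
  | nil => simp
  | cons x t ih =>
    have ht : ∀ y ∈ t, y = a ∨ y = b := fun y hy => hl y (List.mem_cons_of_mem _ hy)
    rcases hl x (List.mem_cons_self) with rfl | rfl
    · have h1 : (x :: t).count x = t.count x + 1 := by simp
      have h2 : (x :: t).count b = t.count b := by
        simp [List.count_cons, hab]
      rw [h1, h2, List.replicate_succ, List.cons_append]
      exact (ih ht).cons _
    · have h1 : (x :: t).count a = t.count a := by
        simp [List.count_cons, Ne.symm hab]
      have h2 : (x :: t).count x = t.count x + 1 := by simp
      rw [h1, h2, List.replicate_succ]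
      exact ((ih ht).cons _).trans List.perm_middle.symm

-- ===== VERDICT (by name: the statement is the Claim_ definition above) =====
-- every clue emitted is "Fermi" or "Pico"
theorem mem_clues (s : List Char) (ps : List (Char × Char)) :
    ∀ x ∈ ps.flatMap (clueStep s), x = "Fermi" ∨ x = "Pico" := by
  intro x hx
  rcases List.mem_flatMap.1 hx with ⟨ab, _, hm⟩
  unfold clueStep at hm
  split_ifs at hm <;> simp_all

theorem get_clue_spec : Claim_equal_get_clue := by
  intro digit secr_number _ hpre
  unfold Spec_get_clue get_clue get_clue_alt
  unfold Pre_get_clue at hpre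
  simp only []
  rw [a_fold_eq_flatMap _ _ hpre, b_fold_counts]
  set s := secr_number.toList
  set clues := (digit.toList.zip s).flatMap (clueStep s) with hc
  set cf := clues.count "Fermi"
  set cp := clues.count "Pico"
  have hperm : clues.Perm (List.replicate cf "Fermi" ++ List.replicate cp "Pico") :=
    perm_counts _ _ (by decide) _ (mem_clues s _)
  have hlen : clues.length = cf + cp := by
    have := hperm.length_eq; simpa using this
  have hsorted : PySem.List.sorted clues (fun x => x) false
      = List.replicate cf "Fermi" ++ List.replicate cp "Pico" := by
    refine PySem.List.sorted_id_eq_of_perm_of_pairwise _ _ hperm.symm ?_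
    refine List.pairwise_append.2 ⟨List.pairwise_replicate.2 (Or.inr (le_refl _)),
      List.pairwise_replicate.2 (Or.inr (le_refl _)), ?_⟩
    intro x hx y hy
    rw [List.eq_of_mem_replicate hx, List.eq_of_mem_replicate hy,
      String.le_iff_toList_le]
    decide
  rw [hsorted]
  by_cases hz : cf = 0 ∧ cp = 0
  · rw [if_pos (by omega), if_pos (by simpa using hz)]
  · rw [if_neg (by omega), if_neg (by simpa using hz)]
    simp
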